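-- pv_equiv track=rewrite | github.com/MrugalN/CS60-Introdution-to-Python | Excercise/pset1/extension.py | get_media_type
-- ===== SOURCE A (Python) =====
-- def get_media_type(file_name):
--     # Dictionary for file extensions to media types
--     media_types = {
--         ".gif": "image/gif",
--         ".jpg": "image/jpeg",
--         ".jpeg": "image/jpeg",
--         ".png": "image/png",
--         ".pdf": "application/pdf",
--         ".txt": "text/plain",
--         ".zip": "application/zip",
--     }
--
--     # Iterate over the dictionary to find the media type
--     for extension, media_type in media_types.items():
--         if file_name.endswith(extension):
--             return media_type
--
--     # Default media type if no match is found
--     return "application/octet-stream"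
-- ===== SOURCE B (Python) =====
-- def get_media_type(file_name):
--     media_types = {
--         ".gif": "image/gif",
--         ".jpg": "image/jpeg",
--         ".jpeg": "image/jpeg",
--         ".png": "image/png",
--         ".pdf": "application/pdf",
--         ".txt": "text/plain",
--         ".zip": "application/zip",
--     }
--     ext = file_name[file_name.rfind("."):]
--     return media_types.get(ext, "application/octet-stream")
-- ===== Notes on version B (the rewrite author's own statement) =====
-- stated objective: idiomatic
-- what changed: Replaces the loop of endswith tests over the extension table with computing the extension once (suffix from the last dot via rfind) and a single dict lookup with a default.
import Mathlib
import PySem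

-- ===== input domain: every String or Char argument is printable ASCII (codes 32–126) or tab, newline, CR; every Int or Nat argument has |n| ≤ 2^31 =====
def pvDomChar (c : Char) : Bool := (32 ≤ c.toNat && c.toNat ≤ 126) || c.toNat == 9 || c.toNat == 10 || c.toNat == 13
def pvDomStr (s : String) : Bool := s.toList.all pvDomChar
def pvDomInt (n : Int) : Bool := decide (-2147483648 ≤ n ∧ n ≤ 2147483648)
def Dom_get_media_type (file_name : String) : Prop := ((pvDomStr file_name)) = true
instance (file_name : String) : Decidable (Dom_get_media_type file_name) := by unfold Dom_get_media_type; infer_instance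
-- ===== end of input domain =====

-- B replaces A's loop of endswith tests with computing the extension once (suffix from the
-- last dot, via rfind) followed by a single dict lookup with a default (more idiomatic).


-- ===== PORT A =====
-- the dict literal of A
def mediaTypesA : PySem.Dict String String :=
  PySem.Dict.mk [(".gif", "image/gif"), (".jpg", "image/jpeg"), (".jpeg", "image/jpeg"),
    (".png", "image/png"), (".pdf", "application/pdf"), (".txt", "text/plain"),
    (".zip", "application/zip")]

-- the 'for extension, media_type in media_types.items(): if file_name.endswith(extension): return media_type' loop
def scanMediaA : List (String × String) → String → String
  | [], _ => "application/octet-stream"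
  | (extension, media_type) :: rest, file_name =>
      if PySem.Str.endswith file_name extension then media_type else scanMediaA rest file_name

def get_media_type (file_name : String) : String :=
  scanMediaA mediaTypesA.items file_name

-- ===== PORT B =====
def mediaTypesB : PySem.Dict String String :=
  PySem.Dict.mk [(".gif", "image/gif"), (".jpg", "image/jpeg"), (".jpeg", "image/jpeg"),
    (".png", "image/png"), (".pdf", "application/pdf"), (".txt", "text/plain"),
    (".zip", "application/zip")]

def get_media_type_alt (file_name : String) : String :=
  let ext := PySem.Str.slice file_name (some (PySem.Str.rfind file_name ".")) none
  mediaTypesB.getD ext "application/octet-stream"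

-- ===== PRECONDITION & SPEC =====
def Spec_get_media_type (file_name : String) (out : String) : Prop := out = get_media_type_alt file_name
instance (file_name : String) (out : String) : Decidable (Spec_get_media_type file_name out) := by unfold Spec_get_media_type; infer_instance

-- ===== CLAIM (what is proved, stated in full; the proofs are below) =====
def Claim_equal_get_media_type : Prop := ∀ (file_name : String), Dom_get_media_type file_name → Spec_get_media_type file_name (get_media_type file_name)

-- ===== LEMMAS AND PROOFS =====

-- the extension B computes, on the character level
def extOf (cs : List Char) : List Char :=
  PySem.List.slice cs (some (PySem.Chars.rfind cs ['.'])) none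

theorem extOf_suffix (cs : List Char) : extOf cs <:+ cs := by
  unfold extOf
  rw [PySem.List.slice_some_none]
  exact List.drop_suffix _ _

theorem rfind_go_succ (s sub : List Char) (j : Nat) :
    PySem.Chars.rfind.go s sub (j+1) =
      if sub.isPrefixOf (s.drop (j+1)) then ((j : Int)+1) else PySem.Chars.rfind.go s sub j := by
  simp [PySem.Chars.rfind.go]

theorem rfind_go_dot (p r : List Char) (hr : '.' ∉ r) :
    ∀ j : Nat, p.length ≤ j → PySem.Chars.rfind.go (p ++ '.'::r) ['.'] j = (p.length : Int) := by
  intro j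
  induction j with
  | zero =>
      intro hj
      have hp : p = [] := List.eq_nil_of_length_eq_zero (Nat.le_zero.mp hj)
      subst hp
      simp [PySem.Chars.rfind.go, List.isPrefixOf]
  | succ j ih =>
      intro hj
      rw [rfind_go_succ]
      by_cases hpl : p.length = j + 1
      · have hd : (p ++ '.'::r).drop (j+1) = '.'::r := by
          rw [← hpl]; exact List.drop_left
        rw [hd]
        simp [List.isPrefixOf, hpl]
      · have hle : p.length ≤ j := by omega
        have hsplit : j + 1 = p.length + (j - p.length + 1) := by omega
        have hd : (p ++ '.'::r).drop (j+1) = r.drop (j - p.length) := by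
          rw [hsplit, List.drop_append]
          rw [List.drop_eq_nil_of_le (by omega)]
          simp
        have hnp : ¬ ((['.'] : List Char).isPrefixOf ((p ++ '.'::r).drop (j+1)) = true) := by
          rw [hd]
          intro hpre
          rw [List.isPrefixOf_iff_prefix] at hpre
          have hmem : '.' ∈ r.drop (j - p.length) := hpre.subset (by simp)
          exact hr (List.mem_of_mem_drop hmem)
        rw [if_neg hnp]
        exact ih hle

theorem ext_iff_endswith (cs r : List Char) (hr : '.' ∉ r) :
    ('.'::r) <:+ cs ↔ extOf cs = '.'::r := by
  constructor
  · rintro ⟨p, rfl⟩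
    unfold extOf PySem.Chars.rfind
    rw [rfind_go_dot p r hr _ (by simp)]
    rw [PySem.List.slice_from_natCast]
    exact List.drop_left
  · intro h
    rw [← h]; exact extOf_suffix cs

theorem ends_iff (s k : String) (r : List Char) (hk : k.toList = '.'::r) (hr : '.' ∉ r) :
    PySem.Str.endswith s k = true ↔
      PySem.Str.slice s (some (PySem.Str.rfind s ".")) none = k := by
  rw [← String.toList_inj]
  have h1 : (PySem.Str.slice s (some (PySem.Str.rfind s ".")) none).toList
      = extOf s.toList := by
    simp [PySem.Str.toList_slice, PySem.Str.rfind_eq, extOf]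
  rw [h1, hk]
  rw [PySem.Str.endswith_eq, hk]
  rw [PySem.Chars.endswith_iff]
  exact ext_iff_endswith s.toList r hr

theorem key_eq (s k : String) (r : List Char) (hk : k.toList = '.'::r) (hr : '.' ∉ r) :
    PySem.Str.endswith s k
      = decide (PySem.Str.slice s (some (PySem.Str.rfind s ".")) none = k) := by
  by_cases h : PySem.Str.slice s (some (PySem.Str.rfind s ".")) none = k
  · rw [decide_eq_true h]
    exact (ends_iff s k r hk hr).mpr h
  · rw [decide_eq_false h]
    cases hc : PySem.Str.endswith s k
    · rfl
    · exact absurd ((ends_iff s k r hk hr).mp hc) h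

-- ===== VERDICT (by name: the statement is the Claim_ definition above) =====
theorem get_media_type_spec : Claim_equal_get_media_type := by
  intro s _
  unfold Spec_get_media_type get_media_type get_media_type_alt
  simp only [scanMediaA, mediaTypesA, mediaTypesB,
    key_eq s ".gif" ['g','i','f'] rfl (by decide), key_eq s ".jpg" ['j','p','g'] rfl (by decide), key_eq s ".jpeg" ['j','p','e','g'] rfl (by decide), key_eq s ".png" ['p','n','g'] rfl (by decide), key_eq s ".pdf" ['p','d','f'] rfl (by decide), key_eq s ".txt" ['t','x','t'] rfl (by decide), key_eq s ".zip" ['z','i','p'] rfl (by decide),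
    PySem.Dict.getD_eq_get?_getD, PySem.Dict.get?_mk_cons, beq_iff_eq, decide_eq_true_eq]
  set e := PySem.Str.slice s (some (PySem.Str.rfind s ".")) none with he
  by_cases h1 : e = ".gif"
  · rw [if_pos h1, if_pos h1.symm]; rfl
  rw [if_neg h1, if_neg (show ¬(".gif":String) = e from fun hh => h1 hh.symm)]
  by_cases h2 : e = ".jpg"
  · rw [if_pos h2, if_pos h2.symm]; rfl
  rw [if_neg h2, if_neg (show ¬(".jpg":String) = e from fun hh => h2 hh.symm)]
  by_cases h3 : e = ".jpeg"
  · rw [if_pos h3, if_pos h3.symm]; rfl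
  rw [if_neg h3, if_neg (show ¬(".jpeg":String) = e from fun hh => h3 hh.symm)]
  by_cases h4 : e = ".png"
  · rw [if_pos h4, if_pos h4.symm]; rfl
  rw [if_neg h4, if_neg (show ¬(".png":String) = e from fun hh => h4 hh.symm)]
  by_cases h5 : e = ".pdf"
  · rw [if_pos h5, if_pos h5.symm]; rfl
  rw [if_neg h5, if_neg (show ¬(".pdf":String) = e from fun hh => h5 hh.symm)]
  by_cases h6 : e = ".txt"
  · rw [if_pos h6, if_pos h6.symm]; rfl
  rw [if_neg h6, if_neg (show ¬(".txt":String) = e from fun hh => h6 hh.symm)]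
  by_cases h7 : e = ".zip"
  · rw [if_pos h7, if_pos h7.symm]; rfl
  rw [if_neg h7, if_neg (show ¬(".zip":String) = e from fun hh => h7 hh.symm)]
  rfl
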